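-- pv_equiv track=rewrite | github.com/nogaems/adventofcode2016 | utils.py | move_along_sequence
-- ===== SOURCE A (Python) =====
-- rotate = lambda move: 90 if move[0] is 'R' else 270
--
-- def move_along_sequence(sequence, start=None):
--     """
--     (0,0) - y, x
--     """
--     if not start:
--         start = (0,0)
--     result = start
--     rotation = 0
--     for move in sequence:
--         rotation = rotation + rotate(move)
--         direction = int((rotation % 360) / 90)
--         value = int(move[1:])
--         if direction is 0:
--             result = (result[0] + value, result[1])
--         elif direction is 1:
--             result = (result[0], result[1] + value)
--         elif direction is 2:
--             result = (result[0] - value, result[1])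
--         elif direction is 3:
--             result = (result[0], result[1] - value)
--     return result
-- ===== SOURCE B (Python) =====
-- def move_along_sequence(sequence, start=None):
--     """
--     (0,0) - y, x
--     """
--     if not start:
--         start = (0, 0)
--     # pass 1: tag each move with its direction index (0:+y, 1:+x, 2:-y, 3:-x)
--     d = 0
--     tagged = []
--     for move in sequence:
--         d = (d + (1 if move[0] == 'R' else 3)) % 4
--         tagged.append((d, int(move[1:])))
--     # pass 2: aggregate distances per direction bucket
--     sums = [0, 0, 0, 0]
--     for di, v in tagged:
--         sums[di] += v
--     # closed-form endpoint from bucket totals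
--     return (start[0] + sums[0] - sums[2], start[1] + sums[1] - sums[3])
-- ===== Notes on version B (the rewrite author's own statement) =====
-- stated objective: alternative
-- what changed: B never simulates the position: it tags each move with a direction index from a running turn count, aggregates values into four per-direction buckets, and computes the endpoint in one closed-form expression from the bucket totals (correct because addition of displacements commutes), replacing A's per-step position update with mod-360 angle arithmetic and a four-way branch.
import Mathlib
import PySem

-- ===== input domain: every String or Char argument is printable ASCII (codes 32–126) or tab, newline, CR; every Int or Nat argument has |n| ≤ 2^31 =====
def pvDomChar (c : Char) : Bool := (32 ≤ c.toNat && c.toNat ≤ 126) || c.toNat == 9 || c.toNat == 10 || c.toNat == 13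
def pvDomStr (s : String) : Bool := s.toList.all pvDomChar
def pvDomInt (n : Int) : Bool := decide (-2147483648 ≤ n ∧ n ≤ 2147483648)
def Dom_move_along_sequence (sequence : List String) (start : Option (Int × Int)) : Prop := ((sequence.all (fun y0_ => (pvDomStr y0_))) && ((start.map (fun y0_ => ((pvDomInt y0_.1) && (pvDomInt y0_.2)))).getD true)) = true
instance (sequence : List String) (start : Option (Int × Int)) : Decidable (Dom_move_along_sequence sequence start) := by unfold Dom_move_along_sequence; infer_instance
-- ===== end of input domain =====

-- B never simulates the position: it tags each move with a direction index (running turn count),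
-- sums values into four per-direction buckets, and computes the endpoint in closed form from the
-- bucket totals, replacing A's per-step position update with mod-360 angle arithmetic. Objective: alternative.


-- ===== PORT A =====
-- rotate = lambda move: 90 if move[0] is 'R' else 270
-- (CPython interns 1-char ASCII strings, so `move[0] is 'R'` behaves as equality on Dom;
--  on an empty move Python raises IndexError — excluded by Pre_, here pyGet? returns none.)
def pvRotate (move : String) : Int :=
  if PySem.Str.pyGet? move 0 = some 'R' then 90 else 270

-- one iteration of A's loop; state = (result, rotation)
-- int((rotation % 360) / 90): float division is exact here (numerator a multiple of 90),
-- so it is ported as floor division.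
def pvStepA (st : (Int × Int) × Int) (move : String) : (Int × Int) × Int :=
  let rotation := st.2 + pvRotate move
  let direction := PySem.Int.floordiv (PySem.Int.mod rotation 360) 90
  let value := (PySem.Int.ofStr? (PySem.Str.slice move (some 1) none)).getD 0
  let result := st.1
  let result :=
    if direction = 0 then (result.1 + value, result.2)
    else if direction = 1 then (result.1, result.2 + value)
    else if direction = 2 then (result.1 - value, result.2)
    else if direction = 3 then (result.1, result.2 - value)
    else result
  (result, rotation)

def move_along_sequence (sequence : List String) (start : Option (Int × Int)) : Int × Int :=
  -- `if not start: start = (0,0)`: a pair argument is always truthy, only None is replaced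
  (sequence.foldl pvStepA (start.getD (0, 0), 0)).1

-- ===== PORT B =====
-- pass 1: d = (d + (1 if move[0]=='R' else 3)) % 4; tagged.append((d, int(move[1:])))
def pvTagStep (st : Int × List (Int × Int)) (move : String) : Int × List (Int × Int) :=
  let d := PySem.Int.mod (st.1 + (if PySem.Str.pyGet? move 0 = some 'R' then 1 else 3)) 4
  (d, st.2 ++ [(d, (PySem.Int.ofStr? (PySem.Str.slice move (some 1) none)).getD 0)])

-- pass 2: sums[di] += v — the 4-slot list `sums` is carried as a 4-tuple, indexed by di
def pvBucketStep (s : Int × Int × Int × Int) (p : Int × Int) : Int × Int × Int × Int :=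
  if p.1 = 0 then (s.1 + p.2, s.2.1, s.2.2.1, s.2.2.2)
  else if p.1 = 1 then (s.1, s.2.1 + p.2, s.2.2.1, s.2.2.2)
  else if p.1 = 2 then (s.1, s.2.1, s.2.2.1 + p.2, s.2.2.2)
  else (s.1, s.2.1, s.2.2.1, s.2.2.2 + p.2)

def move_along_sequence_alt (sequence : List String) (start : Option (Int × Int)) : Int × Int :=
  let st := start.getD (0, 0)
  let tagged := (sequence.foldl pvTagStep (0, [])).2
  let sums := tagged.foldl pvBucketStep (0, 0, 0, 0)
  (st.1 + sums.1 - sums.2.2.1, st.2 + sums.2.1 - sums.2.2.2)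

-- ===== PRECONDITION & SPEC =====
-- Pre_ excludes exactly the inputs where Python A raises: an empty move (IndexError on move[0])
-- or a move whose tail is not int()-parseable (ValueError on int(move[1:])).
def Pre_move_along_sequence (sequence : List String) (start : Option (Int × Int)) : Prop :=
  ∀ move ∈ sequence, move.toList ≠ [] ∧
    (PySem.Int.ofStr? (PySem.Str.slice move (some 1) none)).isSome = true
instance (sequence : List String) (start : Option (Int × Int)) : Decidable (Pre_move_along_sequence sequence start) := by unfold Pre_move_along_sequence; infer_instance
def pvWitness_move_along_sequence : List String × (Option (Int × Int)) := (["R2", "L3"], none)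

def Spec_move_along_sequence (sequence : List String) (start : Option (Int × Int)) (out : Int × Int) : Prop := out = move_along_sequence_alt sequence start
instance (sequence : List String) (start : Option (Int × Int)) (out : Int × Int) : Decidable (Spec_move_along_sequence sequence start out) := by unfold Spec_move_along_sequence; infer_instance

-- ===== CLAIM (what is proved, stated in full; the proofs are below) =====
def Claim_equal_move_along_sequence : Prop := ∀ (sequence : List String) (start : Option (Int × Int)), Dom_move_along_sequence sequence start → Pre_move_along_sequence sequence start → Spec_move_along_sequence sequence start (move_along_sequence sequence start)

-- ===== LEMMAS AND PROOFS =====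

def pvInc (m : String) : Int := if PySem.Str.pyGet? m 0 = some 'R' then 1 else 3
def pvVal (m : String) : Int := (PySem.Int.ofStr? (PySem.Str.slice m (some 1) none)).getD 0

-- the tagged list produced by pass 1 starting from direction d
def pvTagsFrom (d : Int) : List String → List (Int × Int)
  | [] => []
  | m :: ms =>
      let d' := PySem.Int.mod (d + pvInc m) 4
      (d', pvVal m) :: pvTagsFrom d' ms

def pvG (l : List (Int × Int)) : Int × Int × Int × Int := l.foldl pvBucketStep (0, 0, 0, 0)

lemma pvTag_fold (ms : List String) (d : Int) (acc : List (Int × Int)) :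
    (ms.foldl pvTagStep (d, acc)).2 = acc ++ pvTagsFrom d ms := by
  induction ms generalizing d acc with
  | nil => simp [pvTagsFrom]
  | cons m ms ih =>
      simp only [List.foldl_cons, pvTagStep, pvTagsFrom, pvInc, pvVal]
      rw [ih]
      simp

lemma pvG_shift (l : List (Int × Int)) (s : Int × Int × Int × Int) :
    l.foldl pvBucketStep s =
      (s.1 + (pvG l).1, s.2.1 + (pvG l).2.1, s.2.2.1 + (pvG l).2.2.1, s.2.2.2 + (pvG l).2.2.2) := by
  induction l generalizing s with
  | nil => simp [pvG]
  | cons p l ih =>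
      have hg : pvG (p :: l) =
          ((pvBucketStep (0,0,0,0) p).1 + (pvG l).1, (pvBucketStep (0,0,0,0) p).2.1 + (pvG l).2.1,
           (pvBucketStep (0,0,0,0) p).2.2.1 + (pvG l).2.2.1, (pvBucketStep (0,0,0,0) p).2.2.2 + (pvG l).2.2.2) := by
        show List.foldl pvBucketStep (pvBucketStep (0,0,0,0) p) l = _
        rw [ih]
      simp only [List.foldl_cons]
      rw [ih (pvBucketStep s p), hg]
      unfold pvBucketStep
      split_ifs <;> simp [Prod.ext_iff] <;> omega

lemma pv_step_dir (rot d : Int) (m : String)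
    (h1 : PySem.Int.mod rot 360 = 90 * d) (h2 : 0 ≤ d) (h3 : d < 4) :
    PySem.Int.mod (rot + pvRotate m) 360 = 90 * (PySem.Int.mod (d + pvInc m) 4) := by
  rw [PySem.Int.mod_eq_emod_of_pos (by norm_num)] at h1
  rw [PySem.Int.mod_eq_emod_of_pos (by norm_num), PySem.Int.mod_eq_emod_of_pos (by norm_num)]
  unfold pvRotate pvInc
  split_ifs <;> omega

lemma pv_dir_range (d : Int) (m : String) :
    0 ≤ PySem.Int.mod (d + pvInc m) 4 ∧ PySem.Int.mod (d + pvInc m) 4 < 4 := by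
  rw [PySem.Int.mod_eq_emod_of_pos (by norm_num)]
  omega

lemma pv_floordiv_mul (d : Int) (h2 : 0 ≤ d) (h3 : d < 4) :
    PySem.Int.floordiv (90 * d) 90 = d := by
  have h4 : d = 0 ∨ d = 1 ∨ d = 2 ∨ d = 3 := by omega
  rcases h4 with h | h | h | h <;> subst h <;> decide

lemma pv_main (ms : List String) (pos : Int × Int) (rot d : Int)
    (h1 : PySem.Int.mod rot 360 = 90 * d) (h2 : 0 ≤ d) (h3 : d < 4) :
    (ms.foldl pvStepA (pos, rot)).1 =
      (pos.1 + (pvG (pvTagsFrom d ms)).1 - (pvG (pvTagsFrom d ms)).2.2.1,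
       pos.2 + (pvG (pvTagsFrom d ms)).2.1 - (pvG (pvTagsFrom d ms)).2.2.2) := by
  induction ms generalizing pos rot d with
  | nil => simp [pvG, pvTagsFrom]
  | cons m ms ih =>
      obtain ⟨hd0, hd1⟩ := pv_dir_range d m
      have hrot' := pv_step_dir rot d m h1 h2 h3
      have hA : pvStepA (pos, rot) m =
          ((if PySem.Int.mod (d + pvInc m) 4 = 0 then (pos.1 + pvVal m, pos.2)
            else if PySem.Int.mod (d + pvInc m) 4 = 1 then (pos.1, pos.2 + pvVal m)
            else if PySem.Int.mod (d + pvInc m) 4 = 2 then (pos.1 - pvVal m, pos.2)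
            else if PySem.Int.mod (d + pvInc m) 4 = 3 then (pos.1, pos.2 - pvVal m)
            else pos), rot + pvRotate m) := by
        simp only [pvStepA]
        rw [hrot', pv_floordiv_mul _ hd0 hd1]
        simp [pvVal]
      have ht : pvTagsFrom d (m :: ms) =
          (PySem.Int.mod (d + pvInc m) 4, pvVal m) ::
            pvTagsFrom (PySem.Int.mod (d + pvInc m) 4) ms := rfl
      rw [List.foldl_cons, hA, ht]
      have hg : pvG ((PySem.Int.mod (d + pvInc m) 4, pvVal m) ::
            pvTagsFrom (PySem.Int.mod (d + pvInc m) 4) ms) =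
          List.foldl pvBucketStep
            (pvBucketStep (0,0,0,0) (PySem.Int.mod (d + pvInc m) 4, pvVal m))
            (pvTagsFrom (PySem.Int.mod (d + pvInc m) 4) ms) := rfl
      rw [hg, pvG_shift]
      have h4 : PySem.Int.mod (d + pvInc m) 4 = 0 ∨ PySem.Int.mod (d + pvInc m) 4 = 1 ∨
          PySem.Int.mod (d + pvInc m) 4 = 2 ∨ PySem.Int.mod (d + pvInc m) 4 = 3 := by omega
      rcases h4 with h | h | h | h <;>
        rw [h] at hrot' ⊢ <;>
        rw [ih _ _ _ hrot' (by norm_num) (by norm_num)] <;>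
        simp [pvBucketStep, Prod.ext_iff] <;> omega

-- ===== VERDICT (by name: the statement is the Claim_ definition above) =====
theorem move_along_sequence_spec : Claim_equal_move_along_sequence := by
  intro sequence start _ _
  unfold Spec_move_along_sequence move_along_sequence move_along_sequence_alt
  rw [pvTag_fold sequence 0 []]
  simpa using pv_main sequence (start.getD (0, 0)) 0 0 (by decide) (by decide) (by decide)
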